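-- pv_equiv track=rewrite | github.com/alexlitz/cllm_temp | c4_release/neural_vm/archive/multi_nibble_ops.py | div_long
-- ===== SOURCE A (Python) =====
-- def div_long(dividend: int, divisor: int) -> tuple:
--     """
--     Long division using neural ALU primitives.
--
--     Returns (quotient, remainder).
--     """
--     dividend = dividend & 0xFFFFFFFF
--     divisor = divisor & 0xFFFFFFFF
--
--     if divisor == 0:
--         return (0, dividend)
--
--     quotient = 0
--     remainder = 0
--
--     for i in range(31, -1, -1):
--         remainder = (remainder << 1) | ((dividend >> i) & 1)
--         if remainder >= divisor:
--             remainder -= divisor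
--             quotient |= (1 << i)
--
--     return (quotient, remainder)
-- ===== SOURCE B (Python) =====
-- def div_long(dividend: int, divisor: int) -> tuple:
--     """
--     32-bit unsigned division: mask to 32 bits, then use Python's divmod
--     directly instead of a 32-step shift/subtract loop.
--
--     Returns (quotient, remainder).
--     """
--     dividend &= 0xFFFFFFFF
--     divisor &= 0xFFFFFFFF
--     if divisor == 0:
--         return (0, dividend)
--     return divmod(dividend, divisor)
-- ===== Notes on version B (the rewrite author's own statement) =====
-- stated objective: simpler
-- what changed: Replaces the 32-iteration binary long-division (shift/subtract/or) loop with a single divmod on the 32-bit-masked arguments, keeping the divisor==0 guard.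
import Mathlib
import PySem

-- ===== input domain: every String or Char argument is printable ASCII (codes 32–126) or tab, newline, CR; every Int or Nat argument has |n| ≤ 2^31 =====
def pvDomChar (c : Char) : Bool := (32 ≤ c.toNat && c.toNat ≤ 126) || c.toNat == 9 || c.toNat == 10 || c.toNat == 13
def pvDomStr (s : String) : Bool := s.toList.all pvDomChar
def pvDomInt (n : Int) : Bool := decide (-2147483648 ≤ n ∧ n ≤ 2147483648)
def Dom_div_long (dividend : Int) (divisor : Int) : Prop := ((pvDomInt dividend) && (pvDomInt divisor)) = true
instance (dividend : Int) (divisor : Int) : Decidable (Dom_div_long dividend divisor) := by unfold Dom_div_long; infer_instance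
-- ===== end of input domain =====

-- B replaces A's 32-step shift/subtract long-division loop with a single floor-divmod
-- on the 32-bit-masked arguments (same divisor==0 guard); simpler, same results.


-- ===== PORT A =====
-- the `for i in range(31, -1, -1)` loop: fuel n+1 means the current index is i = n
def divLongLoop (dividend divisor : Int) : Nat → Int × Int → Int × Int
  | 0, qr => qr
  | i+1, (quotient, remainder) =>
    let remainder := PySem.Int.bor (remainder <<< (1:Nat)) (PySem.Int.band (dividend >>> i) 1)
    if divisor ≤ remainder then
      divLongLoop dividend divisor i (PySem.Int.bor quotient ((1:Int) <<< i), remainder - divisor)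
    else
      divLongLoop dividend divisor i (quotient, remainder)

def div_long (dividend : Int) (divisor : Int) : Int × Int :=
  let dividend := PySem.Int.band dividend 4294967295
  let divisor := PySem.Int.band divisor 4294967295
  if divisor = 0 then (0, dividend)
  else divLongLoop dividend divisor 32 (0, 0)

-- ===== PORT B =====
def div_long_alt (dividend : Int) (divisor : Int) : Int × Int :=
  let dividend := PySem.Int.band dividend 4294967295
  let divisor := PySem.Int.band divisor 4294967295
  if divisor = 0 then (0, dividend)
  else (PySem.Int.floordiv dividend divisor, PySem.Int.mod dividend divisor)

-- ===== PRECONDITION & SPEC =====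
def Spec_div_long (dividend : Int) (divisor : Int) (out : Int × Int) : Prop := out = div_long_alt dividend divisor
instance (dividend : Int) (divisor : Int) (out : Int × Int) : Decidable (Spec_div_long dividend divisor out) := by unfold Spec_div_long; infer_instance

-- ===== CLAIM (what is proved, stated in full; the proofs are below) =====
def Claim_equal_div_long : Prop := ∀ (dividend : Int) (divisor : Int), Dom_div_long dividend divisor → Spec_div_long dividend divisor (div_long dividend divisor)

-- ===== LEMMAS AND PROOFS =====

-- x & 0xFFFFFFFF is x mod 2^32 for |x| within one word
lemma band_mask_eq (x : Int) (h1 : -4294967296 ≤ x) (h2 : x < 4294967296) :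
    PySem.Int.band x 4294967295 = x % 4294967296 := by
  unfold PySem.Int.band
  by_cases hx : 0 ≤ x
  · simp only [hx, show (0:Int) ≤ 4294967295 by norm_num, if_pos]
    have hmask : (4294967295 : Int).toNat = 2 ^ 32 - 1 := by decide
    rw [hmask, Nat.and_two_pow_sub_one_eq_mod]
    omega
  · simp only [hx, if_false, show (0:Int) ≤ 4294967295 by norm_num, if_pos]
    have hmask : (4294967295 : Int).toNat = 2 ^ 32 - 1 := by decide
    rw [hmask, Nat.land_comm, Nat.and_two_pow_sub_one_eq_mod]
    have hk : (-x - 1).toNat % 2 ^ 32 = (-x - 1).toNat := Nat.mod_eq_of_lt (by omega)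
    rw [hk]
    omega

lemma ediv_emod_of_decomp (a b q r : Int) (hb : 0 < b) (h0 : 0 ≤ r) (h1 : r < b)
    (h : a = r + q * b) : a / b = q ∧ a % b = r := by
  constructor
  · rw [h, Int.add_mul_ediv_right _ _ (by omega : b ≠ 0),
      Int.ediv_eq_zero_of_lt h0 h1, zero_add]
  · rw [h, Int.add_mul_emod_self_right _ _ _, Int.emod_eq_of_lt h0 h1]

lemma lor_two_mul_one (c : Nat) : (2 * c) ||| 1 = 2 * c + 1 := by
  have h := Nat.lor_bit false c true 0
  simpa [Nat.bit] using h

-- (r << 1) | b for 0 ≤ r, b ∈ {0,1} is just 2r+b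
lemma bor_shift_bit (r b : Int) (hr : 0 ≤ r) (hb0 : 0 ≤ b) (hb1 : b < 2) :
    PySem.Int.bor (r <<< (1:Nat)) b = 2 * r + b := by
  have hs : r <<< (1:Nat) = 2 * r := by simp [Int.shiftLeft_eq]; ring
  rw [hs]
  rcases (by omega : b = 0 ∨ b = 1) with h | h
  · simp [h]
  · rw [h, PySem.Int.bor_of_nonneg (by omega) (by norm_num)]
    have ht : (2 * r).toNat = 2 * r.toNat := by omega
    rw [ht, show (1:Int).toNat = 1 from rfl, lor_two_mul_one]
    omega

-- q | (1 << n) for q = c * 2^(n+1), c ≥ 0 is q + 2^n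
lemma bor_pow_bit (c : Int) (n : Nat) (hc : 0 ≤ c) :
    PySem.Int.bor (c * 2 ^ (n+1)) ((1:Int) <<< n) = c * 2 ^ (n+1) + 2 ^ n := by
  have h1n : (1:Int) <<< n = 2 ^ n := by simp [Int.shiftLeft_eq]
  rw [h1n, PySem.Int.bor_of_nonneg (by positivity) (by positivity)]
  have hq : (c * 2 ^ (n+1)).toNat = (2 * c.toNat) <<< n := by
    rw [Nat.shiftLeft_eq]
    have h2p : ((2:Int) ^ (n+1)).toNat = 2 ^ (n+1) := by
      rw [show ((2:Int) ^ (n+1)) = ((2 ^ (n+1) : Nat) : Int) by push_cast; ring, Int.toNat_natCast]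
    have : (c * 2 ^ (n+1)).toNat = c.toNat * 2 ^ (n+1) := by
      rw [Int.toNat_mul hc (by positivity), h2p]
    rw [this]; ring
  have hp : ((2:Int) ^ n).toNat = 1 <<< n := by
    rw [Nat.shiftLeft_eq, one_mul,
      show ((2:Int) ^ n) = ((2 ^ n : Nat) : Int) by push_cast; ring, Int.toNat_natCast]
  rw [hq, hp, ← Nat.shiftLeft_or_distrib, lor_two_mul_one, Nat.shiftLeft_eq]
  push_cast
  have hcast : ((c.toNat : Int)) = c := Int.toNat_of_nonneg hc
  rw [hcast]
  ring

-- the loop invariant: starting from the partial quotient/remainder of the top 32-n bits,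
-- the loop computes the full Euclidean quotient and remainder
lemma divLongLoop_inv (d dv : Int) (hd : 0 ≤ d) (hdv : 0 < dv) :
    ∀ n : Nat, divLongLoop d dv n ((d / 2 ^ n / dv) * 2 ^ n, d / 2 ^ n % dv) = (d / dv, d % dv) := by
  intro n
  induction n with
  | zero => simp [divLongLoop]
  | succ n ih =>
    have h2n : (0:Int) < 2 ^ n := by positivity
    set M := d / 2 ^ (n+1) with hM
    set m := d / 2 ^ n with hm
    have hMm : M = m / 2 := by
      rw [hM, hm, Int.ediv_ediv_of_nonneg (y := (2:Int)^n) (z := 2) (by positivity), ← pow_succ]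
    set b := m % 2 with hb
    have hbb : 0 ≤ b ∧ b < 2 := ⟨Int.emod_nonneg m (by omega), Int.emod_lt_of_pos m (by omega)⟩
    have hm2 : m = 2 * M + b := by rw [hMm, hb]; omega
    set r := M % dv with hr
    have hrb : 0 ≤ r ∧ r < dv := ⟨Int.emod_nonneg M (by omega), Int.emod_lt_of_pos M hdv⟩
    set c := M / dv with hc
    have hMc : M = dv * c + r := by rw [hc, hr]; exact (Int.mul_ediv_add_emod M dv).symm
    have hM0 : 0 ≤ M := Int.ediv_nonneg hd (by positivity)
    have hc0 : 0 ≤ c := Int.ediv_nonneg hM0 (by omega)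
    have hshift : d >>> n = m := by rw [hm, Int.shiftRight_eq_div_pow]; norm_cast
    have hband : PySem.Int.band (d >>> n) 1 = b := by
      rw [hshift, PySem.Int.band_one]
      show Int.fmod m 2 = b
      rw [Int.fmod_eq_emod]; simp [hb]
    show divLongLoop d dv (n+1) ((M / dv) * 2 ^ (n+1), r) = (d / dv, d % dv)
    rw [show M / dv = c from rfl]
    simp only [divLongLoop, hband, bor_shift_bit r b hrb.1 hbb.1 hbb.2]
    have hmdec : m = (2 * r + b) + (2 * c) * dv := by rw [hm2, hMc]; ring
    by_cases hcond : dv ≤ 2 * r + b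
    · rw [if_pos hcond]
      have hmdec' : m = (2 * r + b - dv) + (2 * c + 1) * dv := by rw [hmdec]; ring
      obtain ⟨hq, hrr⟩ := ediv_emod_of_decomp m dv (2 * c + 1) (2 * r + b - dv)
        hdv (by omega) (by omega) hmdec'
      have hqstate : PySem.Int.bor (c * 2 ^ (n+1)) ((1:Int) <<< n) = (m / dv) * 2 ^ n := by
        rw [bor_pow_bit c n hc0, hq, pow_succ]; ring
      rw [hqstate, ← hrr, ih]
    · rw [if_neg hcond]
      obtain ⟨hq, hrr⟩ := ediv_emod_of_decomp m dv (2 * c) (2 * r + b)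
        hdv (by omega) (by omega) hmdec
      have hqstate : c * 2 ^ (n+1) = (m / dv) * 2 ^ n := by rw [hq, pow_succ]; ring
      rw [hqstate, ← hrr, ih]

-- ===== VERDICT (by name: the statement is the Claim_ definition above) =====
theorem div_long_spec : Claim_equal_div_long := by
  intro dividend divisor hdom
  unfold Dom_div_long pvDomInt at hdom
  simp only [Bool.and_eq_true, decide_eq_true_eq] at hdom
  unfold Spec_div_long div_long div_long_alt
  rw [band_mask_eq dividend (by omega) (by omega), band_mask_eq divisor (by omega) (by omega)]
  set d := dividend % 4294967296 with hdd
  set dv := divisor % 4294967296 with hdv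
  have hd0 : 0 ≤ d := Int.emod_nonneg dividend (by norm_num)
  have hdlt : d < 4294967296 := Int.emod_lt_of_pos dividend (by norm_num)
  have hdv0 : 0 ≤ dv := Int.emod_nonneg divisor (by norm_num)
  by_cases h : dv = 0
  · simp [h]
  · have hdvpos : 0 < dv := by omega
    rw [if_neg h, if_neg h]
    have halt : (PySem.Int.floordiv d dv, PySem.Int.mod d dv) = (d / dv, d % dv) := by
      unfold PySem.Int.floordiv PySem.Int.mod
      rw [Int.fdiv_eq_ediv_of_nonneg d hdv0, Int.fmod_eq_emod]
      simp [hdv0]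
    rw [halt]
    have hinit := divLongLoop_inv d dv hd0 hdvpos 32
    have h32 : (2:Int) ^ 32 = 4294967296 := by norm_num
    have hz : d / 2 ^ 32 = 0 := Int.ediv_eq_zero_of_lt hd0 (by omega)
    rw [hz] at hinit
    simpa using hinit
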